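-- pv_equiv track=rewrite | github.com/Mallory24/cae_modeling | scripts/get_negatives.py | get_vid2AFTframes
-- ===== SOURCE A (Python) =====
-- def get_vid2AFTframes(data, id2nframe):
-- 	vid2AFTframe = {}
-- 	for vidseg in data:
-- 		vid = vidseg.split("_")[0]
-- 		if vid not in vid2AFTframe:
-- 			vid2AFTframe[vid] = 0
-- 		AFTframes = (id2nframe.get(vidseg) // 3) * 1
-- 		vid2AFTframe[vid] += AFTframes
-- 	return vid2AFTframe
-- ===== SOURCE B (Python) =====
-- def get_vid2AFTframes(data, id2nframe):
--     # Phase 1: partition vidsegs by video id.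
--     groups = {}
--     for vidseg in data:
--         groups.setdefault(vidseg.split("_")[0], []).append(vidseg)
--     # Phase 2: per-group aggregate.
--     return {vid: sum(id2nframe[s] // 3 for s in segs) for vid, segs in groups.items()}
-- ===== Notes on version B (the rewrite author's own statement) =====
-- stated objective: alternative
-- what changed: B replaces A's single interleaved accumulate loop over a running counter dict with two differently-shaped passes: first partition the vidsegs into per-vid groups (setdefault/append), then a dict comprehension summing id2nframe[s]//3 over each group.
import Mathlib
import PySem

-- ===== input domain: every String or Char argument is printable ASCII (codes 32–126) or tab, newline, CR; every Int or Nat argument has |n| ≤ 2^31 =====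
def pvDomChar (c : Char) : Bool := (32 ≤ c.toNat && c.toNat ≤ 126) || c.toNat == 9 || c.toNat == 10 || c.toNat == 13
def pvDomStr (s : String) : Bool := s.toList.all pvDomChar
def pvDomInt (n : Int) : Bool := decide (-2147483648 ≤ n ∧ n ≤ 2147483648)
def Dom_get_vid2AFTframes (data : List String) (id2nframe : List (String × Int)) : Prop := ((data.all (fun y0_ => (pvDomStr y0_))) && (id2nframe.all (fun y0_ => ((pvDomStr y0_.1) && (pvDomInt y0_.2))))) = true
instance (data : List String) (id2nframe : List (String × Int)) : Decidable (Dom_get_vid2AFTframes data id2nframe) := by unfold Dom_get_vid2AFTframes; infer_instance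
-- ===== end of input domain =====

-- B restructures A's single accumulate-into-a-counter-dict loop into two passes:
-- partition the vidsegs into per-vid groups, then sum id2nframe[s]//3 over each group
-- (objective: alternative decomposition; return value proved equal on Pre_).

-- vidseg.split("_")[0]: split on a nonempty separator always yields a nonempty list,
-- so headD "" is exact (both Pythons compute exactly this).
def pvVid (s : String) : String := (((PySem.Str.split? s "_").getD []).headD "")

-- ===== PORT A =====
def get_vid2AFTframes (data : List String) (id2nframe : List (String × Int)) : List (String × Int) :=
  (data.foldl (fun vid2AFTframe vidseg =>
    let vid := pvVid vidseg
    let vid2AFTframe := if vid2AFTframe.contains vid then vid2AFTframe else vid2AFTframe.insert vid 0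
    -- id2nframe.get(vidseg) // 3: on Pre_ the key is present, so getD 0 is exact (missing key raises in Python)
    let AFTframes := (PySem.Int.floordiv (((PySem.Dict.mk id2nframe).get? vidseg).getD 0) 3) * 1
    vid2AFTframe.modify vid 0 (· + AFTframes))
    (PySem.Dict.empty : PySem.Dict String Int)).items

-- ===== PORT B =====
def get_vid2AFTframes_alt (data : List String) (id2nframe : List (String × Int)) : List (String × Int) :=
  let groups := data.foldl (fun g vidseg => g.modify (pvVid vidseg) [] (· ++ [vidseg]))
    (PySem.Dict.empty : PySem.Dict String (List String))
  groups.items.map (fun p =>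
    (p.1, p.2.foldl (fun acc s => acc + PySem.Int.floordiv (((PySem.Dict.mk id2nframe).get? s).getD 0) 3) 0))

-- ===== PRECONDITION & SPEC =====
-- Pre_ excludes exactly the inputs where the Python A raises (TypeError: None // 3 for a vidseg
-- missing from id2nframe); my B raises KeyError there too.
def Pre_get_vid2AFTframes (data : List String) (id2nframe : List (String × Int)) : Prop :=
  ∀ s ∈ data, (((PySem.Dict.mk id2nframe).get? s).isSome = true)
instance (data : List String) (id2nframe : List (String × Int)) : Decidable (Pre_get_vid2AFTframes data id2nframe) := by unfold Pre_get_vid2AFTframes; infer_instance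

def pvWitness_get_vid2AFTframes : List String × (List (String × Int)) :=
  (["v1_a", "v1_b", "v2_a"], [("v1_a", 7), ("v1_b", 4), ("v2_a", 9)])

def Spec_get_vid2AFTframes (data : List String) (id2nframe : List (String × Int)) (out : List (String × Int)) : Prop := out = get_vid2AFTframes_alt data id2nframe
instance (data : List String) (id2nframe : List (String × Int)) (out : List (String × Int)) : Decidable (Spec_get_vid2AFTframes data id2nframe out) := by unfold Spec_get_vid2AFTframes; infer_instance

-- ===== CLAIM (what is proved, stated in full; the proofs are below) =====
def Claim_equal_get_vid2AFTframes : Prop := ∀ (data : List String) (id2nframe : List (String × Int)), Dom_get_vid2AFTframes data id2nframe → Pre_get_vid2AFTframes data id2nframe → Spec_get_vid2AFTframes data id2nframe (get_vid2AFTframes data id2nframe)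

-- ===== LEMMAS AND PROOFS =====

-- lookup value added per vidseg
def pvF (id2nframe : List (String × Int)) (s : String) : Int :=
  PySem.Int.floordiv (((PySem.Dict.mk id2nframe).get? s).getD 0) 3

-- value-map relating B's groups to A's counters
def pvSum (id2nframe : List (String × Int)) (p : String × List String) : String × Int :=
  (p.1, p.2.foldl (fun acc s => acc + pvF id2nframe s) 0)

theorem pv_map_replace_id {α : Type} (l : List (String × α)) (k : String) (v : α)
    (h : l.any (fun p => p.1 == k) = false) :
    l.map (fun p => if p.1 == k then (k, v) else p) = l := by
  induction l with
  | nil => rfl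
  | cons p t ih =>
    simp only [List.any_cons, Bool.or_eq_false_iff] at h
    rw [List.map_cons, if_neg (by simp [h.1]), ih h.2]

theorem pv_insert_items_pos {α : Type} (d : PySem.Dict String α) (k : String) (v : α)
    (h : d.contains k = true) :
    (d.insert k v).items = d.items.map (fun p => if p.1 == k then (k, v) else p) := by
  simp [PySem.Dict.insert, h]

theorem pv_insert_items_neg {α : Type} (d : PySem.Dict String α) (k : String) (v : α)
    (h : d.contains k = false) :
    (d.insert k v).items = d.items ++ [(k, v)] := by
  simp [PySem.Dict.insert, h]

theorem pv_getD_eq {α : Type} (d : PySem.Dict String α) (k : String) (dflt : α) :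
    d.getD k dflt = ((d.items.find? (fun p => p.1 == k)).map (·.2)).getD dflt := by
  simp [PySem.Dict.getD, PySem.Dict.get?]

theorem pv_foldl_add_append (id2 : List (String × Int)) (l : List String) (s : String) (a : Int) :
    (l ++ [s]).foldl (fun acc t => acc + pvF id2 t) a
      = l.foldl (fun acc t => acc + pvF id2 t) a + pvF id2 s := by
  simp [List.foldl_append]

theorem pv_step (id2 : List (String × Int)) (s : String)
    (d : PySem.Dict String Int) (g : PySem.Dict String (List String))
    (h : d.items = g.items.map (pvSum id2)) :
    ((if d.contains (pvVid s) then d else d.insert (pvVid s) 0).modify (pvVid s) 0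
        (· + pvF id2 s * 1)).items
      = (g.modify (pvVid s) [] (· ++ [s])).items.map (pvSum id2) := by
  set k := pvVid s with hk
  have hcc : d.contains k = g.contains k := by
    simp only [PySem.Dict.contains, h, List.any_map]; rfl
  have hfind : d.items.find? (fun p => p.1 == k)
      = (g.items.find? (fun p => p.1 == k)).map (pvSum id2) := by
    rw [h, List.find?_map]; rfl
  by_cases hgc : g.contains k = true
  case pos =>
    have hd : d.contains k = true := by rw [hcc]; exact hgc
    obtain ⟨q, hq⟩ : ∃ q, g.items.find? (fun p => p.1 == k) = some q := by
      have hga : g.items.any (fun p => p.1 == k) = true := hgc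
      rcases List.any_eq_true.mp hga with ⟨p, hp, hpk⟩
      exact Option.isSome_iff_exists.mp (List.find?_isSome.mpr ⟨p, hp, hpk⟩)
    have hdg : d.getD k 0 = q.2.foldl (fun acc t => acc + pvF id2 t) 0 := by
      rw [pv_getD_eq, hfind, hq]; rfl
    have hgg : g.getD k [] = q.2 := by
      rw [pv_getD_eq, hq]; rfl
    simp only [hd, if_true, PySem.Dict.modify, hdg, hgg]
    rw [pv_insert_items_pos _ _ _ hd, pv_insert_items_pos _ _ _ hgc,
      h, List.map_map, List.map_map]
    apply List.map_congr_left
    intro p _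
    by_cases hpk : (p.1 == k) = true
    · simp only [Function.comp, pvSum, hpk, if_true]
      rw [pv_foldl_add_append]
      simp
    · simp [Function.comp, pvSum, hpk]
  case neg =>
    have hgc' : g.contains k = false := by simpa using hgc
    have hd : d.contains k = false := by rw [hcc]; exact hgc'
    have hdany : d.items.any (fun p => p.1 == k) = false := by
      simpa [PySem.Dict.contains] using hd
    have hgf : g.items.find? (fun p => p.1 == k) = none := by
      rw [← Option.not_isSome_iff_eq_none]
      intro hs
      rcases List.find?_isSome.mp hs with ⟨p, hp, hpk⟩
      have hga : g.items.any (fun p => p.1 == k) = true := List.any_eq_true.mpr ⟨p, ⟨hp, hpk⟩⟩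
      have : g.contains k = true := hga
      rw [hgc'] at this
      cases this
    have hdf : d.items.find? (fun p => p.1 == k) = none := by
      rw [hfind, hgf]; rfl
    have hgg : g.getD k [] = ([] : List String) := by
      rw [pv_getD_eq, hgf]; rfl
    set d2 := d.insert k 0 with hd2
    have hd2items : d2.items = d.items ++ [(k, 0)] := pv_insert_items_neg _ _ _ hd
    have hd2c : d2.contains k = true := by
      simp [PySem.Dict.contains, hd2items]
    have hd2g : d2.getD k 0 = 0 := by
      rw [pv_getD_eq, hd2items, List.find?_append, hdf]
      simp
    simp only [hd, Bool.false_eq_true, if_false, PySem.Dict.modify, hd2g, hgg]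
    rw [pv_insert_items_pos _ _ _ hd2c, pv_insert_items_neg _ _ _ hgc',
      hd2items, List.map_append, pv_map_replace_id _ _ _ hdany, h, List.map_append]
    simp [pvSum]

theorem pv_main (id2 : List (String × Int)) (data : List String)
    (d : PySem.Dict String Int) (g : PySem.Dict String (List String))
    (h : d.items = g.items.map (pvSum id2)) :
    (data.foldl (fun d vidseg =>
        (if d.contains (pvVid vidseg) then d else d.insert (pvVid vidseg) 0).modify (pvVid vidseg) 0
          (· + pvF id2 vidseg * 1)) d).items
      = ((data.foldl (fun g vidseg => g.modify (pvVid vidseg) [] (· ++ [vidseg])) g).items).map (pvSum id2) := by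
  induction data generalizing d g with
  | nil => simpa using h
  | cons s rest ih => exact ih _ _ (pv_step id2 s d g h)

-- ===== VERDICT (by name: the statement is the Claim_ definition above) =====
theorem get_vid2AFTframes_spec : Claim_equal_get_vid2AFTframes := by
  intro data id2 _ _
  unfold Spec_get_vid2AFTframes get_vid2AFTframes get_vid2AFTframes_alt
  exact pv_main id2 data _ _ rfl
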